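-- pv_equiv track=rewrite | github.com/ozcodx/games_info | get_info.py | process_tags
-- ===== SOURCE A (Python) =====
-- def process_tags(tags):
--     # Initialize empty lists for categories and interfaces
--     category = None
--     interfaces = []
--     other_tags = []
--
--     # Split the tags string into individual tags
--     tag_list = tags.split(', ')
--
--     for tag in tag_list:
--         if tag.startswith('game::'):
--             category = tag.split('::')[1]  # Extract the category part after 'game::'
--         elif tag.startswith('interface::'):
--             interfaces.append(tag.split('::')[1])  # Extract the interface part after 'interface::'
--         else:
--             other_tags.append(tag)  # Add the remaining tags to other_tags
--
--     # Join interface and other tags into comma-separated strings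
--     interface_tags = ', '.join(interfaces)
--     other_category_tags = ', '.join(other_tags)
--
--     return category, interface_tags, other_category_tags
-- ===== SOURCE B (Python) =====
-- def process_tags(tags):
--     tag_list = tags.split(', ')
--     game = [t for t in tag_list if t.startswith('game::')]
--     category = game[-1].split('::')[1] if game else None
--     interface_tags = ', '.join(t.split('::')[1] for t in tag_list
--                                if t.startswith('interface::'))
--     other_category_tags = ', '.join(t for t in tag_list
--                                     if not t.startswith('game::')
--                                     and not t.startswith('interface::'))
--     return category, interface_tags, other_category_tags
-- ===== Notes on version B (the rewrite author's own statement) =====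
-- stated objective: idiomatic
-- what changed: Replaces the single branching accumulator loop by one split followed by three independent filter passes (category = last 'game::' tag, comprehensions joined directly), no mutable accumulators.
import Mathlib
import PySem

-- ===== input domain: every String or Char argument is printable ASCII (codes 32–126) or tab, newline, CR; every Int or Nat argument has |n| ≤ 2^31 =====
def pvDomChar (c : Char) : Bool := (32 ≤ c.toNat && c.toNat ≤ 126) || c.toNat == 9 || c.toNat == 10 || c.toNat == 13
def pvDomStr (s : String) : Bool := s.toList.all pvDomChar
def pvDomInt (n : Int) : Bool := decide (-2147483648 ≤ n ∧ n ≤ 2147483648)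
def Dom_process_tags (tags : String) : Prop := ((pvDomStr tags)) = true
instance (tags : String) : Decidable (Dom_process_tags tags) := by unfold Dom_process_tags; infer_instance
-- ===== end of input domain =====

-- B replaces A's single branching accumulator loop by one split and three independent
-- filter passes (category = last 'game::' tag), same O(n) cost; proved equal on Dom.

-- shared helper: tag.split('::')[1]; the separator is non-empty so split? is some, and
-- both Pythons only apply it to tags that start with 'game::'/'interface::', where index 1 exists.
def pvSeg1 (tag : String) : String :=
  PySem.List.pyGetD ((PySem.Str.split? tag "::").getD []) 1 ""

-- ===== PORT A =====
def process_tags (tags : String) : Option String × String × String :=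
  let tag_list := (PySem.Str.split? tags ", ").getD []   -- ', ' ≠ '' so split? is exact
  let st := tag_list.foldl
    (fun (acc : Option String × List String × List String) tag =>
      if PySem.Str.startswith tag "game::" then
        (some (pvSeg1 tag), acc.2.1, acc.2.2)
      else if PySem.Str.startswith tag "interface::" then
        (acc.1, acc.2.1 ++ [pvSeg1 tag], acc.2.2)
      else
        (acc.1, acc.2.1, acc.2.2 ++ [tag]))
    (none, [], [])
  (st.1, PySem.Str.join ", " st.2.1, PySem.Str.join ", " st.2.2)

-- ===== PORT B =====
def process_tags_alt (tags : String) : Option String × String × String :=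
  let tag_list := (PySem.Str.split? tags ", ").getD []
  let game := tag_list.filter (fun t => PySem.Str.startswith t "game::")
  let category := (PySem.List.pyGet? game (-1)).map pvSeg1   -- game[-1].split(...)[1] if game else None
  let interface_tags := PySem.Str.join ", "
    ((tag_list.filter (fun t => PySem.Str.startswith t "interface::")).map pvSeg1)
  let other_category_tags := PySem.Str.join ", "
    (tag_list.filter (fun t =>
      !PySem.Str.startswith t "game::" && !PySem.Str.startswith t "interface::"))
  (category, interface_tags, other_category_tags)

-- ===== PRECONDITION & SPEC =====
def Spec_process_tags (tags : String) (out : Option String × String × String) : Prop :=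
  out = process_tags_alt tags
instance (tags : String) (out : Option String × String × String) :
    Decidable (Spec_process_tags tags out) := by unfold Spec_process_tags; infer_instance

-- ===== CLAIM =====
def Claim_equal_process_tags : Prop :=
  ∀ (tags : String), Dom_process_tags tags → Spec_process_tags tags (process_tags tags)

-- ===== LEMMAS AND PROOFS =====

-- a tag cannot start with both 'game::' and 'interface::'
lemma pv_not_both (t : String) (hg : PySem.Str.startswith t "game::" = true) :
    PySem.Str.startswith t "interface::" = false := by
  by_contra h
  have hi : PySem.Str.startswith t "interface::" = true := by
    cases hx : PySem.Str.startswith t "interface::" <;> simp_all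
  have hg' := (PySem.Chars.startswith_iff t.toList "game::".toList).mp (by simpa using hg)
  have hi' := (PySem.Chars.startswith_iff t.toList "interface::".toList).mp (by simpa using hi)
  rcases hg' with ⟨u, hu⟩
  rcases hi' with ⟨v, hv⟩
  rw [← hu] at hv
  have : List.head? ("game::".toList ++ u) = List.head? ("interface::".toList ++ v) := by rw [hv]
  simp at this

lemma pv_last_opt {α β : Type} (p : α → Bool) (f : α → β) (l : List α) (c : Option β) :
    l.foldl (fun acc t => if p t then some (f t) else acc) c
      = ((l.filter p).map (fun t => some (f t))).getLastD c := by
  induction l generalizing c with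
  | nil => rfl
  | cons a l ih =>
    by_cases h : p a = true
    · simp only [List.foldl_cons, if_pos h, ih, List.filter_cons_of_pos h, List.map_cons,
        List.getLastD_cons]
    · simp only [List.foldl_cons, if_neg h, ih, List.filter_cons_of_neg h]

lemma pv_pyGet_neg_one {α : Type} (l : List α) :
    PySem.List.pyGet? l (-1) = l.getLast? := by
  cases l with
  | nil => rfl
  | cons a l =>
    simp [PySem.List.pyGet?, PySem.List.pyIdx?, List.getLast?_eq_getElem?]

lemma pv_loop {A B : Type} (pg pi : A → Bool) (f : A → B)
    (hnb : ∀ t, pg t = true → pi t = false) (l : List A) (c : Option B) (i : List B) (o : List A) :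
    l.foldl
      (fun (acc : Option B × List B × List A) tag =>
        if pg tag then (some (f tag), acc.2.1, acc.2.2)
        else if pi tag then (acc.1, acc.2.1 ++ [f tag], acc.2.2)
        else (acc.1, acc.2.1, acc.2.2 ++ [tag])) (c, i, o)
    = (l.foldl (fun acc t => if pg t then some (f t) else acc) c,
       i ++ (l.filter pi).map f,
       o ++ l.filter (fun t => !pg t && !pi t)) := by
  induction l generalizing c i o with
  | nil => simp
  | cons a l ih =>
    by_cases hg : pg a = true
    · have hi := hnb a hg
      simp [List.foldl_cons, hg, hi, ih]
    · by_cases hi : pi a = true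
      · simp [List.foldl_cons, hg, hi, ih]
      · simp [List.foldl_cons, hg, hi, ih]

-- ===== VERDICT =====
theorem process_tags_spec : Claim_equal_process_tags := by
  intro tags _
  unfold Spec_process_tags process_tags process_tags_alt
  simp only [pv_loop (fun t => PySem.Str.startswith t "game::") (fun t => PySem.Str.startswith t "interface::") pvSeg1 pv_not_both, List.nil_append]
  refine Prod.ext ?_ rfl
  show _ = (PySem.List.pyGet? _ (-1)).map pvSeg1
  rw [pv_pyGet_neg_one, pv_last_opt]
  rcases h : (((PySem.Str.split? tags ", ").getD []).filter
      (fun t => PySem.Str.startswith t "game::")) with _ | ⟨x, xs⟩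
  · simp
  · simp only [List.getLastD_eq_getLast?, List.getLast?_eq_getElem?, List.length_map,
      List.getElem?_map]
    simp
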